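-- pv_equiv track=rewrite | github.com/paiml/depyler | examples/hard_pathological_mixed3.py | count_numeric_tokens
-- ===== SOURCE A (Python) =====
-- def is_digit_char(c: str) -> bool:
--     """Check if character is a digit.
--     Workaround: avoid returning chained comparison directly (generates .as_str()
--     which is unstable). Use explicit if/else instead."""
--     if c == "0" or c == "1" or c == "2" or c == "3" or c == "4":
--         return True
--     if c == "5" or c == "6" or c == "7" or c == "8" or c == "9":
--         return True
--     return False
--
-- def is_valid_integer_str(s: str) -> bool:
--     """Check if string represents a valid integer."""
--     if len(s) == 0:
--         return False
--     start: int = 0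
--     c0: str = s[0]
--     if c0 == "-" or c0 == "+":
--         start = 1
--     if start >= len(s):
--         return False
--     i: int = start
--     while i < len(s):
--         c: str = s[i]
--         if is_digit_char(c) == False:
--             return False
--         i = i + 1
--     return True
--
-- def count_numeric_tokens(text: str) -> int:
--     """Count how many space-separated tokens are valid integers."""
--     count: int = 0
--     current: str = ""
--     i: int = 0
--     while i < len(text):
--         c: str = text[i]
--         if c == " ":
--             if len(current) > 0:
--                 if is_valid_integer_str(current) == True:
--                     count = count + 1
--                 current = ""
--         else:
--             current = current + c
--         i = i + 1
--     if len(current) > 0: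
--         if is_valid_integer_str(current) == True:
--             count = count + 1
--     return count
-- ===== SOURCE B (Python) =====
-- def _is_int_token(tok: str) -> bool:
--     body = tok[1:] if tok[:1] in ("+", "-") else tok
--     return body != "" and all(ch in "0123456789" for ch in body)
--
-- def count_numeric_tokens(text: str) -> int:
--     """Count how many space-separated tokens are valid integers."""
--     return sum(1 for tok in text.split(" ") if _is_int_token(tok))
-- ===== Notes on version B (the rewrite author's own statement) =====
-- stated objective: idiomatic
-- what changed: Replaced the hand-rolled character-by-character scanner (explicit index loop, manual token accumulator, digit check by a 10-way equality chain) with a two-phase split(" ")-then-filter: tokenize once with the standard library, then count tokens matching a declarative sign-strip + all-digits check.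
import Mathlib
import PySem

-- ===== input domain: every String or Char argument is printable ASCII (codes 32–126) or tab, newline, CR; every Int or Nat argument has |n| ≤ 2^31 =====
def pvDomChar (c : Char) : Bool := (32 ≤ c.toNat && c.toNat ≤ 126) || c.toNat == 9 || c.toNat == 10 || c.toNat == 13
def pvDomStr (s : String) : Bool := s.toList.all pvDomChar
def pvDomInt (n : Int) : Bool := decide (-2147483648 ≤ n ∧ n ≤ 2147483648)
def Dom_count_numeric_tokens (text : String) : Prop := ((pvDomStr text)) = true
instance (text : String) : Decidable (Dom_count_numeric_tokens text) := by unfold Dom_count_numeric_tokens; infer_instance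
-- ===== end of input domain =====

-- B replaces A's hand-rolled character scanner by an idiomatic split-then-filter; same return value, no speed claim.


-- ===== PORT A =====
-- is_digit_char: the 10-way equality chain, branch order kept
def is_digit_char (c : Char) : Bool :=
  if c == '0' || c == '1' || c == '2' || c == '3' || c == '4' then true
  else if c == '5' || c == '6' || c == '7' || c == '8' || c == '9' then true
  else false

-- the 'while i < len(s)' digit-checking loop of is_valid_integer_str, on the remaining characters
def validLoopA (l : List Char) : Bool :=
  match l with
  | [] => true
  | c :: r => if is_digit_char c == false then false else validLoopA r

def is_valid_integer_str (s : List Char) : Bool :=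
  match s with
  | [] => false                                   -- len(s) == 0
  | c0 :: _ =>
    let start : Nat := if c0 == '-' || c0 == '+' then 1 else 0
    if start ≥ s.length then false
    else validLoopA (s.drop start)

-- the 'while i < len(text)' loop of count_numeric_tokens: state (count, current)
def loopA (cs : List Char) (count : Int) (current : List Char) : Int :=
  match cs with
  | [] =>
      if current.length > 0 then
        (if is_valid_integer_str current == true then count + 1 else count)
      else count
  | c :: rest =>
      if c == ' ' then
        loopA rest
          (if current.length > 0 then
            (if is_valid_integer_str current == true then count + 1 else count)
           else count) []
      else
        loopA rest count (current ++ [c])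

def count_numeric_tokens (text : String) : Int := loopA text.toList 0 []

-- ===== PORT B =====
-- _is_int_token: strip one optional sign, then nonempty and all characters in "0123456789"
def isIntTokenB (tok : List Char) : Bool :=
  let body := if tok.take 1 = ['+'] ∨ tok.take 1 = ['-'] then tok.drop 1 else tok
  decide (body ≠ []) && body.all (fun ch => ("0123456789".toList).contains ch)

-- text.split(" ") ported as the corresponding library function List.splitOn ' '
def count_numeric_tokens_alt (text : String) : Int :=
  (((text.toList.splitOn ' ').filter isIntTokenB).length : Int)

-- ===== PRECONDITION & SPEC =====
def Spec_count_numeric_tokens (text : String) (out : Int) : Prop := out = count_numeric_tokens_alt text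
instance (text : String) (out : Int) : Decidable (Spec_count_numeric_tokens text out) := by unfold Spec_count_numeric_tokens; infer_instance

-- ===== CLAIM (what is proved, stated in full; the proofs are below) =====
def Claim_equal_count_numeric_tokens : Prop := ∀ (text : String), Dom_count_numeric_tokens text → Spec_count_numeric_tokens text (count_numeric_tokens text)

-- ===== LEMMAS AND PROOFS =====

theorem digit_eq (c : Char) : is_digit_char c = ("0123456789".toList).contains c := by
  have h : "0123456789".toList = ['0','1','2','3','4','5','6','7','8','9'] := by decide
  simp only [is_digit_char, h, List.contains_cons, List.contains_nil]
  split_ifs with h1 h2 <;> simp_all <;> tauto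

theorem validLoopA_eq_all (l : List Char) : validLoopA l = l.all is_digit_char := by
  induction l with
  | nil => rfl
  | cons c r ih =>
    simp only [validLoopA, List.all_cons, ih]
    cases h : is_digit_char c <;> simp [h]

theorem valid_eq (s : List Char) : is_valid_integer_str s = isIntTokenB s := by
  have hfun : is_digit_char = (fun ch => (("0123456789".toList).contains ch)) := funext digit_eq
  cases s with
  | nil => rfl
  | cons c0 t =>
    by_cases h0 : c0 = '+'
    · subst h0
      cases t with
      | nil => decide
      | cons d r => simp [is_valid_integer_str, isIntTokenB, validLoopA_eq_all, hfun]
    · by_cases h1 : c0 = '-'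
      · subst h1
        cases t with
        | nil => decide
        | cons d r => simp [is_valid_integer_str, isIntTokenB, validLoopA_eq_all, hfun]
      · simp [is_valid_integer_str, isIntTokenB, validLoopA_eq_all, hfun, h0, h1]

-- the per-token contribution at a flush point
theorem flush_eq (current : List Char) (count : Int) :
    (if current.length > 0 then
       (if is_valid_integer_str current == true then count + 1 else count)
     else count)
    = count + (if isIntTokenB current then 1 else 0) := by
  have h0 : isIntTokenB [] = false := by decide
  cases current with
  | nil => simp [h0]
  | cons c t =>
    rw [valid_eq]
    simp only [List.length_cons, Nat.zero_lt_succ, if_pos]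
    cases h : isIntTokenB (c :: t) <;> simp [h]

-- main loop invariant: provided current holds no space, loopA counts the
-- valid tokens of current ++ cs split on spaces, added to count
theorem loopA_eq (cs : List Char) : ∀ (count : Int) (current : List Char), (' ' ∉ current) →
    loopA cs count current
      = count + ((((current ++ cs).splitOn ' ').filter isIntTokenB).length : Int) := by
  induction cs with
  | nil =>
    intro count current h
    have hsingle : current.splitOn ' ' = [current] := by
      apply List.splitOnP_eq_single
      intro x hx
      simp [ne_of_mem_of_not_mem hx h]
    simp only [loopA, List.append_nil, hsingle, List.filter]
    rw [flush_eq]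
    cases hb : isIntTokenB current <;> simp [hb]
  | cons c rest ih =>
    intro count current h
    by_cases hc : c = ' '
    · subst hc
      have hsplit : (current ++ ' ' :: rest).splitOn ' ' = current :: rest.splitOn ' ' := by
        apply List.splitOnP_first _ _ (fun x hx => by simp [ne_of_mem_of_not_mem hx h]) _ (by simp)
      simp only [loopA, beq_self_eq_true, if_true, hsplit, List.filter]
      rw [ih _ [] (by simp), flush_eq]
      cases hb : isIntTokenB current <;> simp [hb] <;> push_cast <;> ring
    · have hbeq : (c == ' ') = false := by simp [hc]
      simp only [loopA, hbeq, Bool.false_eq_true, if_false]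
      rw [ih count (current ++ [c]) (by simp [h, Ne.symm hc])]
      simp

theorem count_numeric_tokens_eq (text : String) :
    count_numeric_tokens text = count_numeric_tokens_alt text := by
  unfold count_numeric_tokens count_numeric_tokens_alt
  rw [loopA_eq text.toList 0 [] (by simp)]
  simp

-- ===== VERDICT (by name: the statement is the Claim_ definition above) =====
theorem count_numeric_tokens_spec : Claim_equal_count_numeric_tokens := by
  intro text _
  unfold Spec_count_numeric_tokens
  exact count_numeric_tokens_eq text
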